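-- pv_equiv track=rewrite | github.com/linzeyang/leetcode-solutions | easy/3692.py | majorityFrequencyGroup
-- ===== SOURCE A (Python) =====
-- from collections import Counter
--
-- def majorityFrequencyGroup(s: str) -> str:
--     counter: Counter[str] = Counter(s)
--
--     freq_dict: dict[int, list[str]] = {}
--
--     for char, freq in counter.items():
--         if freq not in freq_dict:
--             freq_dict[freq] = [char]
--         else:
--             freq_dict[freq].append(char)
--
--     max_count: int = max(len(val) for val in freq_dict.values())
--
--     candidates: dict[int, list[str]] = {
--         k: v for k, v in freq_dict.items() if len(v) == max_count
--     }
--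
--     max_k: int = max(candidates.keys())
--
--     return "".join(candidates[max_k])
-- ===== SOURCE B (Python) =====
-- from collections import Counter
--
--
-- def majorityFrequencyGroup(s: str) -> str:
--     counter = Counter(s)
--     freqs = sorted(counter.values())
--     best_len = 0
--     best_freq = 0
--     i = 0
--     while i < len(freqs):
--         j = i + 1
--         while j < len(freqs) and freqs[j] == freqs[i]:
--             j += 1
--         if best_len <= j - i:
--             best_len = j - i
--             best_freq = freqs[i]
--         i = j
--     return "".join(c for c in counter if counter[c] == best_freq)
-- ===== Notes on version B (the rewrite author's own statement) =====
-- stated objective: alternative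
-- what changed: A groups characters into per-frequency lists in a dict and joins the winning group; B never builds groups: it sorts the multiset of frequencies, scans it for the longest run (ties to the later, i.e. higher, frequency) with two index pointers, and rebuilds the output by one filter pass over the counter.
import Mathlib
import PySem

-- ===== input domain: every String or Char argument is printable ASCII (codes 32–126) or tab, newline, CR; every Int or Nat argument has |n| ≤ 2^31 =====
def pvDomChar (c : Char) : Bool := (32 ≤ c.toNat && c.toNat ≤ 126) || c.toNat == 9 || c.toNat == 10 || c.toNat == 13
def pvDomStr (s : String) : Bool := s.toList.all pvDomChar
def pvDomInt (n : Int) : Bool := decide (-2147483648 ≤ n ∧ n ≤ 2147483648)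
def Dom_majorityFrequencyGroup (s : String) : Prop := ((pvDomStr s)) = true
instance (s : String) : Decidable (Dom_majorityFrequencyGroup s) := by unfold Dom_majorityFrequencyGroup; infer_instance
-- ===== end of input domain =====

-- B drops A's per-frequency dict of character lists entirely: it sorts the multiset of
-- frequencies and scans its runs (longest run, ties to the later = higher frequency),
-- then rebuilds the output by one filter pass over the counter (return values only).

-- ===== PORT A =====
def majorityFrequencyGroup (s : String) : String :=
  let counter : PySem.Dict Char Int := PySem.Dict.counter s.toList
  let freq_dict : PySem.Dict Int (List Char) :=
    counter.items.foldl (fun d p =>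
      if d.contains p.2 = false then d.insert p.2 [p.1]
      else d.modify p.2 [] (fun v => v ++ [p.1])) PySem.Dict.empty
  match PySem.List.max? (freq_dict.values.map (fun v => (v.length : Int))) (fun x => x) with
  | none => ""  -- Python: max() of an empty generator raises ValueError (excluded by Pre_)
  | some max_count =>
    let candidates : PySem.Dict Int (List Char) :=
      PySem.Dict.mk (freq_dict.items.filter (fun p => (p.2.length : Int) == max_count))
    match PySem.List.max? candidates.keys (fun x => x) with
    | none => ""  -- unreachable: candidates is nonempty whenever freq_dict is
    | some max_k =>
      match candidates.get? max_k with
      | none => ""  -- unreachable: max_k is a key of candidates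
      | some chars => String.ofList chars

-- ===== PORT B =====
-- B's two nested while loops over indices i / j: structural recursion on the sorted list;
-- the inner 'j' loop is the takeWhile/dropWhile split of the current run.
def pvScan : List Int → Int → Int → Int
  | [], _, bf => bf
  | f :: rest, bl, bf =>
    let k : Int := 1 + ((rest.takeWhile (fun x => x == f)).length : Int)
    let rest' := rest.dropWhile (fun x => x == f)
    if bl ≤ k then pvScan rest' k f else pvScan rest' bl bf
termination_by l _ _ => l.length
decreasing_by
  · exact Nat.lt_succ_of_le (List.length_dropWhile_le _ _)
  · exact Nat.lt_succ_of_le (List.length_dropWhile_le _ _)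

def majorityFrequencyGroup_alt (s : String) : String :=
  let counter : PySem.Dict Char Int := PySem.Dict.counter s.toList
  let freqs : List Int := PySem.List.sorted counter.values (fun x => x) false
  let best_freq : Int := pvScan freqs 0 0
  String.ofList (counter.keys.filter (fun c => counter.getD c 0 == best_freq))

-- ===== PRECONDITION & SPEC =====
-- Pre_ excludes only the empty string, on which A's max() raises ValueError (B returns "").
def Pre_majorityFrequencyGroup (s : String) : Prop := s ≠ ""
instance (s : String) : Decidable (Pre_majorityFrequencyGroup s) := by unfold Pre_majorityFrequencyGroup; infer_instance
def pvWitness_majorityFrequencyGroup : String := "aab"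

def Spec_majorityFrequencyGroup (s : String) (out : String) : Prop := out = majorityFrequencyGroup_alt s
instance (s : String) (out : String) : Decidable (Spec_majorityFrequencyGroup s out) := by unfold Spec_majorityFrequencyGroup; infer_instance

-- ===== CLAIM (what is proved, stated in full; the proofs are below) =====
def Claim_equal_majorityFrequencyGroup : Prop := ∀ (s : String), Dom_majorityFrequencyGroup s → Pre_majorityFrequencyGroup s → Spec_majorityFrequencyGroup s (majorityFrequencyGroup s)
-- ===== LEMMAS AND PROOFS =====

-- Shared vocabulary: the distinct characters of cs in first-appearance order (pvU),
-- each character's frequency (pvCnt), the distinct frequencies in that order (pvF),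
-- the characters having a given frequency (pvGrp) and how many there are (pvG).
def pvCnt (cs : List Char) (c : Char) : Int := (cs.count c : Int)
def pvU (cs : List Char) : List Char := PySem.Set.ofList cs
def pvF (cs : List Char) : List Int := PySem.Set.ofList ((pvU cs).map (pvCnt cs))
def pvGrp (cs : List Char) (f : Int) : List Char := (pvU cs).filter (fun c => pvCnt cs c == f)
def pvG (cs : List Char) (f : Int) : Int := ((pvGrp cs f).length : Int)

-- swapped-key instance of PySem.Dict.getD_foldl_modify_append (A's loop keys on p.2 and appends p.1)
lemma pv_getD_foldl_modify_snd (l : List (Char × Int)) (d : PySem.Dict Int (List Char)) (f : Int) :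
    (l.foldl (fun d p => d.modify p.2 [] (fun v => v ++ [p.1])) d).getD f []
      = d.getD f [] ++ (l.filter (fun p => p.2 == f)).map (fun p => p.1) := by
  have h := PySem.Dict.getD_foldl_modify_append (l.map Prod.swap) d f
  rw [List.foldl_map] at h
  simpa [List.filter_map, List.map_map, Function.comp] using h

-- A's insert/append branches are exactly Dict.modify with default []
lemma pv_fd_eq (cs : List Char) :
    (PySem.Dict.counter cs).items.foldl (fun d p =>
        if d.contains p.2 = false then d.insert p.2 [p.1]
        else d.modify p.2 [] (fun v => v ++ [p.1])) PySem.Dict.empty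
      = (PySem.Dict.counter cs).items.foldl
          (fun d p => d.modify p.2 [] (fun v => v ++ [p.1])) PySem.Dict.empty := by
  apply PySem.List.foldl_congr_mem
  intro d p _
  cases hc : d.contains p.2 with
  | true => rw [if_neg (by simp)]
  | false =>
    rw [if_pos rfl]
    simp [PySem.Dict.modify, PySem.Dict.getD_of_not_contains d _ hc]

lemma pv_fd_getD (cs : List Char) (f : Int) :
    ((PySem.Dict.counter cs).items.foldl (fun d p =>
        if d.contains p.2 = false then d.insert p.2 [p.1]
        else d.modify p.2 [] (fun v => v ++ [p.1])) PySem.Dict.empty).getD f []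
      = pvGrp cs f := by
  rw [pv_fd_eq, PySem.Dict.items_counter, pv_getD_foldl_modify_snd]
  simp [List.filter_map, List.map_map, Function.comp_def, pvGrp, pvU, pvCnt]

lemma pv_fd_keys (cs : List Char) :
    ((PySem.Dict.counter cs).items.foldl (fun d p =>
        if d.contains p.2 = false then d.insert p.2 [p.1]
        else d.modify p.2 [] (fun v => v ++ [p.1])) PySem.Dict.empty).keys
      = pvF cs := by
  rw [pv_fd_eq]
  rw [PySem.Dict.keys_foldl_modify_key (PySem.Dict.counter cs).items (fun p => p.2) []
      (fun d p v => v ++ [p.1]) PySem.Dict.empty]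
  rw [PySem.Dict.items_counter, List.map_map]
  rfl

lemma pv_fd_nodup (cs : List Char) :
    ((PySem.Dict.counter cs).items.foldl (fun d p =>
        if d.contains p.2 = false then d.insert p.2 [p.1]
        else d.modify p.2 [] (fun v => v ++ [p.1])) PySem.Dict.empty).keys.Nodup := by
  rw [pv_fd_keys]; exact PySem.Set.nodup_ofList _

lemma pv_fd_items (cs : List Char) :
    ((PySem.Dict.counter cs).items.foldl (fun d p =>
        if d.contains p.2 = false then d.insert p.2 [p.1]
        else d.modify p.2 [] (fun v => v ++ [p.1])) PySem.Dict.empty).items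
      = (pvF cs).map (fun f => (f, pvGrp cs f)) := by
  rw [PySem.Dict.items_eq_map_keys _ (pv_fd_nodup cs) [], pv_fd_keys]
  exact List.map_congr_left (fun f _ => by rw [pv_fd_getD])

lemma pv_counter_values (cs : List Char) :
    (PySem.Dict.counter cs).values = (pvU cs).map (pvCnt cs) := by
  show (PySem.Dict.counter cs).items.map (fun p => p.2) = _
  rw [PySem.Dict.items_counter, List.map_map]
  rfl

-- how many distinct characters have frequency f = the size of f's group
lemma pv_cnt_g (cs : List Char) (f : Int) :
    (((pvU cs).map (pvCnt cs)).count f : Int) = pvG cs f := by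
  rw [List.count_eq_countP, List.countP_map, List.countP_eq_length_filter]
  rfl

-- A feeds the group sizes (pvF cs).map (pvG cs) to its first max()
lemma pv_A_list (cs : List Char) :
    (((PySem.Dict.counter cs).items.foldl (fun d p =>
        if d.contains p.2 = false then d.insert p.2 [p.1]
        else d.modify p.2 [] (fun v => v ++ [p.1])) PySem.Dict.empty).values).map
        (fun v => (v.length : Int))
      = (pvF cs).map (pvG cs) := by
  show ((_ : PySem.Dict Int (List Char)).items.map (fun p => p.2)).map _ = _
  rw [pv_fd_items, List.map_map, List.map_map]
  rfl

-- and the candidate frequencies to its second max()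
lemma pv_cand_keys (cs : List Char) (mc : Int) :
    (PySem.Dict.mk ((((PySem.Dict.counter cs).items.foldl (fun d p =>
        if d.contains p.2 = false then d.insert p.2 [p.1]
        else d.modify p.2 [] (fun v => v ++ [p.1])) PySem.Dict.empty).items).filter
          (fun p => (p.2.length : Int) == mc))).keys
      = (pvF cs).filter (fun f => pvG cs f == mc) := by
  show ((_ : List (Int × List Char)).filter _).map (fun p => p.1) = _
  rw [pv_fd_items, List.filter_map, List.map_map]
  simp [Function.comp_def, pvG]

-- A's final lookup returns the winning frequency's character group
lemma pv_cand_get (cs : List Char) (mc mk : Int)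
    (hmem : mk ∈ (pvF cs).filter (fun f => pvG cs f == mc)) :
    (PySem.Dict.mk ((((PySem.Dict.counter cs).items.foldl (fun d p =>
        if d.contains p.2 = false then d.insert p.2 [p.1]
        else d.modify p.2 [] (fun v => v ++ [p.1])) PySem.Dict.empty).items).filter
          (fun p => (p.2.length : Int) == mc))).get? mk
      = some (pvGrp cs mk) := by
  rw [List.mem_filter] at hmem
  apply PySem.Dict.get?_of_mem_items
  · show _ ∈ List.filter _ _
    rw [pv_fd_items, List.mem_filter]
    exact ⟨List.mem_map.mpr ⟨mk, hmem.1, rfl⟩, hmem.2⟩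
  · rw [show (PySem.Dict.mk _).keys = _ from pv_cand_keys cs mc]
    exact (PySem.Set.nodup_ofList _).filter _

-- B's final filter pass rebuilds exactly that group, in first-appearance order
lemma pv_B_out (cs : List Char) (mk : Int) :
    (PySem.Dict.counter cs).keys.filter (fun c => (PySem.Dict.counter cs).getD c 0 == mk)
      = pvGrp cs mk := by
  rw [PySem.Dict.keys_counter]
  exact List.filter_congr (fun c _ => by rw [PySem.Dict.getD_counter]; rfl)

-- on a nondecreasing list whose prefix run has been dropped, everything left is strictly larger
lemma pv_dropWhile_gt (rest : List Int) (f : Int) (hp : rest.Pairwise (· ≤ ·))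
    (hf : ∀ y ∈ rest, f ≤ y) :
    ∀ y ∈ rest.dropWhile (fun x => x == f), f < y := by
  induction rest with
  | nil => simp
  | cons a t ih =>
    by_cases ha : a = f
    · rw [List.dropWhile_cons_of_pos (by simp [ha])]
      exact ih (hp.of_cons) (fun y hy => hf y (List.mem_cons_of_mem a hy))
    · rw [List.dropWhile_cons_of_neg (by simp [ha])]
      intro y hy
      rcases List.mem_cons.mp hy with rfl | hyt
      · exact lt_of_le_of_ne (hf y (List.mem_cons_self)) (fun h => ha h.symm)
      · exact lt_of_lt_of_le
          (lt_of_le_of_ne (hf a List.mem_cons_self) (fun h => ha h.symm))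
          ((List.pairwise_cons.mp hp).1 y hyt)

-- what the run scan computes on a sorted list: the last (= largest) value whose
-- multiplicity is maximal and at least the incoming best length, else the incoming best
lemma pvScan_spec : ∀ (n : Nat) (l : List Int), l.length ≤ n → l.Pairwise (· ≤ ·) →
    ∀ bl bf : Int,
    ((∃ x ∈ l, bl ≤ (l.count x : Int)) →
      (pvScan l bl bf ∈ l ∧ bl ≤ (l.count (pvScan l bl bf) : Int) ∧
       (∀ y ∈ l, (l.count y : Int) ≤ (l.count (pvScan l bl bf) : Int)) ∧
       (∀ y ∈ l, (l.count y : Int) = (l.count (pvScan l bl bf) : Int) → y ≤ pvScan l bl bf)))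
    ∧ ((¬ ∃ x ∈ l, bl ≤ (l.count x : Int)) → pvScan l bl bf = bf) := by
  intro n
  induction n with
  | zero =>
    intro l hl _ bl bf
    have : l = [] := List.eq_nil_of_length_eq_zero (Nat.le_zero.mp hl)
    subst this
    exact ⟨fun h => by simp at h, fun _ => by rw [pvScan]⟩
  | succ n ih =>
    intro l hl hp bl bf
    match l with
    | [] => exact ⟨fun h => by simp at h, fun _ => by rw [pvScan]⟩
    | f :: rest =>
      -- the run decomposition
      set t := rest.takeWhile (fun x => x == f) with ht
      set d := rest.dropWhile (fun x => x == f) with hd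
      have hrest : t ++ d = rest := List.takeWhile_append_dropWhile
      have htf : ∀ y ∈ t, y = f := fun y hy => by
        have := List.mem_takeWhile_imp hy; simpa using this
      have hfle : ∀ y ∈ rest, f ≤ y := (List.pairwise_cons.mp hp).1
      have hdgt : ∀ y ∈ d, f < y := pv_dropWhile_gt rest f hp.of_cons hfle
      have hdsub : ∀ y ∈ d, y ∈ rest := fun y hy => (List.dropWhile_sublist _).mem hy
      have hdp : d.Pairwise (· ≤ ·) := hp.of_cons.sublist (List.dropWhile_sublist _)
      have hdlen : d.length ≤ n := by
        have h1 : d.length ≤ rest.length := List.length_dropWhile_le _ _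
        have h2 : rest.length + 1 ≤ n + 1 := hl
        omega
      set k : Int := 1 + (t.length : Int) with hk
      -- count bookkeeping
      have hcf : ((f :: rest).count f : Int) = k := by
        rw [← hrest, List.count_cons_self, List.count_append]
        have h1 : t.count f = t.length := List.count_eq_length.mpr (fun y hy => by
          simpa using (htf y hy).symm)
        have h2 : d.count f = 0 := List.count_eq_zero.mpr (fun hmem =>
          absurd rfl (ne_of_gt (hdgt f hmem)))
        rw [h1, h2]; push_cast; ring
      have hcd : ∀ y ∈ d, ((f :: rest).count y : Int) = (d.count y : Int) := by
        intro y hy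
        have hyf : y ≠ f := ne_of_gt (hdgt y hy)
        rw [← hrest, List.count_cons_of_ne (Ne.symm hyf), List.count_append]
        have : t.count y = 0 := List.count_eq_zero.mpr (fun hmem =>
          hyf (htf y hmem))
        rw [this]; push_cast; ring
      have hmem_split : ∀ y, y ∈ f :: rest → y = f ∨ y ∈ d := by
        intro y hy
        rcases List.mem_cons.mp hy with rfl | hyr
        · exact Or.inl rfl
        · rw [← hrest] at hyr
          rcases List.mem_append.mp hyr with hyt | hyd
          · exact Or.inl (htf y hyt)
          · exact Or.inr hyd
      have hscan : pvScan (f :: rest) bl bf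
          = if bl ≤ k then pvScan d k f else pvScan d bl bf := by
        rw [pvScan, ← ht, ← hd, ← hk]
      by_cases hbl : bl ≤ k
      · -- the run is taken
        rw [if_pos hbl] at hscan
        by_cases hex : ∃ x ∈ d, k ≤ (d.count x : Int)
        · have IH := ((ih d hdlen hdp k f).1) hex
          set r := pvScan d k f with hr
          have hrd : r ∈ d := IH.1
          have hrl : r ∈ f :: rest := List.mem_cons_of_mem f (hdsub r hrd)
          have hcr : ((f :: rest).count r : Int) = (d.count r : Int) := hcd r hrd
          constructor
          · intro _
            rw [hscan]
            refine ⟨hrl, ?_, ?_, ?_⟩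
            · rw [hcr]; exact le_trans hbl IH.2.1
            · intro y hy
              rcases hmem_split y hy with rfl | hyd
              · rw [hcf, hcr]; exact IH.2.1
              · rw [hcd y hyd, hcr]; exact IH.2.2.1 y hyd
            · intro y hy hcnt
              rcases hmem_split y hy with rfl | hyd
              · exact le_of_lt (hdgt r hrd)
              · rw [hcd y hyd, hcr] at hcnt
                exact IH.2.2.2 y hyd hcnt
          · intro hno
            exact absurd ⟨f, List.mem_cons_self, by rw [hcf]; exact hbl⟩ hno
        · have IH := ((ih d hdlen hdp k f).2) hex
          rw [IH] at hscan
          push_neg at hex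
          constructor
          · intro _
            rw [hscan]
            refine ⟨List.mem_cons_self, by rw [hcf]; exact hbl, ?_, ?_⟩
            · intro y hy
              rcases hmem_split y hy with rfl | hyd
              · exact le_refl _
              · rw [hcd y hyd, hcf]
                exact le_of_lt (hex y hyd)
            · intro y hy hcnt
              rcases hmem_split y hy with rfl | hyd
              · exact le_refl _
              · exfalso
                have := hex y hyd
                rw [hcd y hyd, hcf] at hcnt
                omega
          · intro hno
            exact absurd ⟨f, List.mem_cons_self, by rw [hcf]; exact hbl⟩ hno
      · -- the run is skipped
        rw [if_neg hbl] at hscan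
        push_neg at hbl
        by_cases hex : ∃ x ∈ d, bl ≤ (d.count x : Int)
        · have IH := ((ih d hdlen hdp bl bf).1) hex
          set r := pvScan d bl bf with hr
          have hrd : r ∈ d := IH.1
          have hcr : ((f :: rest).count r : Int) = (d.count r : Int) := hcd r hrd
          constructor
          · intro _
            rw [hscan]
            refine ⟨List.mem_cons_of_mem f (hdsub r hrd), by rw [hcr]; exact IH.2.1, ?_, ?_⟩
            · intro y hy
              rcases hmem_split y hy with rfl | hyd
              · rw [hcf, hcr]
                have := IH.2.1
                omega
              · rw [hcd y hyd, hcr]; exact IH.2.2.1 y hyd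
            · intro y hy hcnt
              rcases hmem_split y hy with rfl | hyd
              · exact le_of_lt (hdgt r hrd)
              · rw [hcd y hyd, hcr] at hcnt
                exact IH.2.2.2 y hyd hcnt
          · intro hno
            exact absurd hex (by
              push_neg at hno ⊢
              intro x hx
              have := hno x (List.mem_cons_of_mem f (hdsub x hx))
              rw [hcd x hx] at this
              exact this)
        · have IH := ((ih d hdlen hdp bl bf).2) hex
          rw [IH] at hscan
          push_neg at hex
          constructor
          · intro hyes
            exfalso
            obtain ⟨x, hx, hcx⟩ := hyes
            rcases hmem_split x hx with rfl | hxd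
            · rw [hcf] at hcx; omega
            · rw [hcd x hxd] at hcx
              have := hex x hxd
              omega
          · intro _
            exact hscan

-- ===== VERDICT (by name: the statement is the Claim_ definition above) =====
theorem majorityFrequencyGroup_spec : Claim_equal_majorityFrequencyGroup := by
  intro s _ hpre
  unfold Spec_majorityFrequencyGroup
  have hcs : s.toList ≠ [] := fun h => hpre (String.toList_eq_nil_iff.mp h)
  simp only [majorityFrequencyGroup, majorityFrequencyGroup_alt]
  rw [pv_A_list]
  -- the sorted frequency list fed to B's run scan
  have hUne : pvU s.toList ≠ [] := by
    obtain ⟨c, hc⟩ := List.exists_mem_of_ne_nil _ hcs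
    exact List.ne_nil_of_mem ((PySem.Set.mem_ofList _ c).mpr hc)
  have hVp : (PySem.List.sorted ((PySem.Dict.counter s.toList).values) (fun x => x) false).Perm
      ((pvU s.toList).map (pvCnt s.toList)) := by
    rw [← pv_counter_values]; exact PySem.List.sorted_perm _ _ _
  have hVcount : ∀ x : Int,
      (((PySem.List.sorted ((PySem.Dict.counter s.toList).values) (fun x => x) false).count x : Int))
        = pvG s.toList x := fun x => by rw [hVp.count_eq, pv_cnt_g]
  have hVmem : ∀ x : Int,
      x ∈ PySem.List.sorted ((PySem.Dict.counter s.toList).values) (fun x => x) false ↔ x ∈ pvF s.toList :=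
    fun x => (hVp.mem_iff).trans (PySem.Set.mem_ofList _ x).symm
  have hVne : PySem.List.sorted ((PySem.Dict.counter s.toList).values) (fun x => x) false ≠ [] := by
    rw [Ne, PySem.List.sorted_eq_nil_iff, pv_counter_values]
    exact fun h => hUne (List.map_eq_nil_iff.mp h)
  have hVsorted : (PySem.List.sorted ((PySem.Dict.counter s.toList).values) (fun x => x) false).Pairwise (· ≤ ·) := by
    have := PySem.List.sorted_pairwise ((PySem.Dict.counter s.toList).values) (fun x => x)
    simpa using this
  obtain ⟨x0, hx0⟩ := List.exists_mem_of_ne_nil _ hVne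
  have hscan := (pvScan_spec
      (PySem.List.sorted ((PySem.Dict.counter s.toList).values) (fun x => x) false).length
      (PySem.List.sorted ((PySem.Dict.counter s.toList).values) (fun x => x) false)
      le_rfl hVsorted 0 0).1 ⟨x0, hx0, Int.natCast_nonneg _⟩
  obtain ⟨hbmemV, -, hbmax, hbties⟩ := hscan
  have hbF : pvScan (PySem.List.sorted ((PySem.Dict.counter s.toList).values) (fun x => x) false) 0 0 ∈ pvF s.toList :=
    (hVmem _).mp hbmemV
  have hbmaxF : ∀ f ∈ pvF s.toList, pvG s.toList f
      ≤ pvG s.toList (pvScan (PySem.List.sorted ((PySem.Dict.counter s.toList).values) (fun x => x) false) 0 0) := by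
    intro f hf
    have := hbmax f ((hVmem f).mpr hf)
    rwa [hVcount, hVcount] at this
  -- A's first max() is some M
  cases hM : PySem.List.max? ((pvF s.toList).map (pvG s.toList)) (fun x => x) with
  | none =>
    exfalso
    have := (PySem.List.max?_eq_none_iff _ _).mp hM
    have hFne : pvF s.toList ≠ [] := by
      obtain ⟨c, hc⟩ := List.exists_mem_of_ne_nil _ hUne
      exact List.ne_nil_of_mem ((PySem.Set.mem_ofList _ _).mpr (List.mem_map.mpr ⟨c, hc, rfl⟩))
    exact hFne (List.map_eq_nil_iff.mp this)
  | some M =>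
    have hMmax : ∀ f ∈ pvF s.toList, pvG s.toList f ≤ M := fun f hf =>
      PySem.List.max?_isMax hM _ (List.mem_map.mpr ⟨f, hf, rfl⟩)
    have hbM : pvG s.toList (pvScan (PySem.List.sorted ((PySem.Dict.counter s.toList).values) (fun x => x) false) 0 0) = M := by
      obtain ⟨f0, hf0, hf0M⟩ := List.mem_map.mp (PySem.List.max?_mem hM)
      exact le_antisymm (hMmax _ hbF) (hf0M ▸ hbmaxF f0 hf0)
    have hbfilt : pvScan (PySem.List.sorted ((PySem.Dict.counter s.toList).values) (fun x => x) false) 0 0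
        ∈ (pvF s.toList).filter (fun f => pvG s.toList f == M) :=
      List.mem_filter.mpr ⟨hbF, by simp [hbM]⟩
    dsimp only
    rw [pv_cand_keys]
    cases hK : PySem.List.max? ((pvF s.toList).filter (fun f => pvG s.toList f == M)) (fun x => x) with
    | none =>
      exact absurd ((PySem.List.max?_eq_none_iff _ _).mp hK) (List.ne_nil_of_mem hbfilt)
    | some max_k =>
      have hkfilt := PySem.List.max?_mem hK
      have hkF : max_k ∈ pvF s.toList := (List.mem_filter.mp hkfilt).1
      have hkM : pvG s.toList max_k = M := by
        have := (List.mem_filter.mp hkfilt).2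
        simpa using this
      have h1 : pvScan (PySem.List.sorted ((PySem.Dict.counter s.toList).values) (fun x => x) false) 0 0 ≤ max_k :=
        PySem.List.max?_isMax hK _ hbfilt
      have h2 : max_k ≤ pvScan (PySem.List.sorted ((PySem.Dict.counter s.toList).values) (fun x => x) false) 0 0 := by
        apply hbties max_k ((hVmem max_k).mpr hkF)
        rw [hVcount, hVcount, hkM, hbM]
      have hbk : max_k = pvScan (PySem.List.sorted ((PySem.Dict.counter s.toList).values) (fun x => x) false) 0 0 :=
        le_antisymm h2 h1
      dsimp only
      rw [pv_cand_get s.toList M max_k hkfilt, pv_B_out, hbk]
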